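-- pv_equiv track=rewrite | github.com/mahir2002/trading-bot | coinmarketcap_fetcher.py | categorize_crypto
-- ===== SOURCE A (Python) =====
-- from typing import Dict, List, Optional
--
-- def categorize_crypto(name: str, symbol: str, tags: List[str]) -> str:
--     """
--     Categorize cryptocurrency based on name, symbol, and tags
--     Enhanced categorization using CMC tags
--     """
--     name_lower = name.lower()
--     symbol_upper = symbol.upper()
--     tags_lower = [tag.lower() for tag in tags]
--
--     # Use CMC tags for better categorization
--     if any(tag in tags_lower for tag in ['defi', 'decentralized-exchange', 'yield-farming', 'lending-borrowing']):
--         return 'DeFi'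
--     elif any(tag in tags_lower for tag in ['memes', 'meme', 'dog-themed']):
--         return 'Meme'
--     elif any(tag in tags_lower for tag in ['gaming', 'play-to-earn', 'nft', 'metaverse', 'virtual-reality']):
--         return 'Gaming'
--     elif any(tag in tags_lower for tag in ['ai-big-data', 'artificial-intelligence', 'machine-learning']):
--         return 'AI'
--     elif any(tag in tags_lower for tag in ['layer-1', 'smart-contracts', 'platform']):
--         return 'Layer1'
--     elif any(tag in tags_lower for tag in ['layer-2', 'scaling', 'ethereum-ecosystem']):
--         return 'Layer2'
--     elif any(tag in tags_lower for tag in ['privacy', 'privacy-coins']):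
--         return 'Privacy'
--     elif any(tag in tags_lower for tag in ['stablecoin', 'stablecoins']):
--         return 'Stablecoin'
--     elif any(tag in tags_lower for tag in ['exchange-based-tokens', 'centralized-exchange']):
--         return 'Exchange'
--     elif any(tag in tags_lower for tag in ['storage', 'distributed-computing', 'filesharing']):
--         return 'Storage'
--     elif any(tag in tags_lower for tag in ['oracles', 'oracle']):
--         return 'Oracle'
--     elif any(tag in tags_lower for tag in ['social-money', 'content-creation', 'fan-token']):
--         return 'Social'
--     elif any(tag in tags_lower for tag in ['enterprise-solutions', 'supply-chain']):
--         return 'Enterprise'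
--     elif any(tag in tags_lower for tag in ['wrapped-tokens', 'tokenized-btc']):
--         return 'Wrapped'
--     elif any(tag in tags_lower for tag in ['derivatives', 'prediction-markets']):
--         return 'Derivatives'
--     elif any(tag in tags_lower for tag in ['energy', 'carbon-credit']):
--         return 'Energy'
--     elif any(tag in tags_lower for tag in ['real-estate', 'commodities']):
--         return 'RealWorld'
--
--     # Fallback to symbol-based categorization
--     major_coins = ['BTC', 'ETH', 'BNB', 'XRP', 'ADA', 'SOL', 'DOT', 'AVAX', 'MATIC', 'LINK', 'LTC', 'BCH', 'ETC', 'XLM', 'VET', 'TRX', 'FIL', 'EOS', 'THETA', 'AAVE']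
--     if symbol_upper in major_coins:
--         return 'Major'
--
--     return 'Other'
-- ===== SOURCE B (Python) =====
-- from typing import List
--
-- # Priority groups in A's elif order; each lowercased tag belongs to at most one group.
-- _GROUPS = [
--     ('DeFi', ['defi', 'decentralized-exchange', 'yield-farming', 'lending-borrowing']),
--     ('Meme', ['memes', 'meme', 'dog-themed']),
--     ('Gaming', ['gaming', 'play-to-earn', 'nft', 'metaverse', 'virtual-reality']),
--     ('AI', ['ai-big-data', 'artificial-intelligence', 'machine-learning']),
--     ('Layer1', ['layer-1', 'smart-contracts', 'platform']),
--     ('Layer2', ['layer-2', 'scaling', 'ethereum-ecosystem']),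
--     ('Privacy', ['privacy', 'privacy-coins']),
--     ('Stablecoin', ['stablecoin', 'stablecoins']),
--     ('Exchange', ['exchange-based-tokens', 'centralized-exchange']),
--     ('Storage', ['storage', 'distributed-computing', 'filesharing']),
--     ('Oracle', ['oracles', 'oracle']),
--     ('Social', ['social-money', 'content-creation', 'fan-token']),
--     ('Enterprise', ['enterprise-solutions', 'supply-chain']),
--     ('Wrapped', ['wrapped-tokens', 'tokenized-btc']),
--     ('Derivatives', ['derivatives', 'prediction-markets']),
--     ('Energy', ['energy', 'carbon-credit']),
--     ('RealWorld', ['real-estate', 'commodities']),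
-- ]
--
-- # Inverted index: keyword tag -> (priority rank, category).
-- _TAG_RANK = {}
-- for _rank, (_cat, _kws) in enumerate(_GROUPS):
--     for _kw in _kws:
--         _TAG_RANK[_kw] = (_rank, _cat)
--
-- _MAJOR_COINS = {'BTC', 'ETH', 'BNB', 'XRP', 'ADA', 'SOL', 'DOT', 'AVAX', 'MATIC',
--                 'LINK', 'LTC', 'BCH', 'ETC', 'XLM', 'VET', 'TRX', 'FIL', 'EOS', 'THETA', 'AAVE'}
--
--
-- def categorize_crypto(name, symbol, tags):
--     # Single pass over the tags: look each one up in the inverted index and keep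
--     # the best (lowest-rank) hit; the rank order reproduces the elif priority.
--     best = None
--     for tag in tags:
--         r = _TAG_RANK.get(tag.lower())
--         if r is not None and (best is None or r[0] < best[0]):
--             best = r
--     if best is not None:
--         return best[1]
--     return 'Major' if symbol.upper() in _MAJOR_COINS else 'Other'
-- ===== Notes on version B (the rewrite author's own statement) =====
-- stated objective: faster
-- what changed: Inverts the iteration: instead of scanning the 17 category groups in priority order and testing each against the tag list, B builds an inverted index (tag -> (priority rank, category)) once at module level and makes a single pass over the input tags, keeping the lowest-rank hit; keyword groups are pairwise disjoint so the minimum rank equals the first elif that would fire.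
import Mathlib
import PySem

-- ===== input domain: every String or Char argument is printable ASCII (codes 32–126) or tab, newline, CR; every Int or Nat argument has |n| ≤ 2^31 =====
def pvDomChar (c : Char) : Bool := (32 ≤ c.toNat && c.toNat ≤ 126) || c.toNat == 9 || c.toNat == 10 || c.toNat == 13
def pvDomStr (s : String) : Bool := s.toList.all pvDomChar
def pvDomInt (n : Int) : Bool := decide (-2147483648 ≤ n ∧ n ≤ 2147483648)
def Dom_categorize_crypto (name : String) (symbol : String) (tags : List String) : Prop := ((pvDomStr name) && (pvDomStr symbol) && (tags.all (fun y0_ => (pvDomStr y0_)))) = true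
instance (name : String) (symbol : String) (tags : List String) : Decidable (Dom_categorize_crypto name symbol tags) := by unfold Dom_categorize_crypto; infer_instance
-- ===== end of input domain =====

-- B inverts the iteration: a tag->(rank,category) index built once, one pass over the tags keeping the lowest-rank hit (vs A scanning 17 keyword groups per call).


set_option maxRecDepth 40000

-- ===== PORT A =====
def categorize_crypto (name : String) (symbol : String) (tags : List String) : String :=
  let _name_lower := PySem.Str.lower name   -- computed by A, never used
  let symbol_upper := PySem.Str.upper symbol
  let tags_lower := tags.map PySem.Str.lower
  if ["defi", "decentralized-exchange", "yield-farming", "lending-borrowing"].any (fun t => tags_lower.contains t) then "DeFi"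
  else if ["memes", "meme", "dog-themed"].any (fun t => tags_lower.contains t) then "Meme"
  else if ["gaming", "play-to-earn", "nft", "metaverse", "virtual-reality"].any (fun t => tags_lower.contains t) then "Gaming"
  else if ["ai-big-data", "artificial-intelligence", "machine-learning"].any (fun t => tags_lower.contains t) then "AI"
  else if ["layer-1", "smart-contracts", "platform"].any (fun t => tags_lower.contains t) then "Layer1"
  else if ["layer-2", "scaling", "ethereum-ecosystem"].any (fun t => tags_lower.contains t) then "Layer2"
  else if ["privacy", "privacy-coins"].any (fun t => tags_lower.contains t) then "Privacy"
  else if ["stablecoin", "stablecoins"].any (fun t => tags_lower.contains t) then "Stablecoin"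
  else if ["exchange-based-tokens", "centralized-exchange"].any (fun t => tags_lower.contains t) then "Exchange"
  else if ["storage", "distributed-computing", "filesharing"].any (fun t => tags_lower.contains t) then "Storage"
  else if ["oracles", "oracle"].any (fun t => tags_lower.contains t) then "Oracle"
  else if ["social-money", "content-creation", "fan-token"].any (fun t => tags_lower.contains t) then "Social"
  else if ["enterprise-solutions", "supply-chain"].any (fun t => tags_lower.contains t) then "Enterprise"
  else if ["wrapped-tokens", "tokenized-btc"].any (fun t => tags_lower.contains t) then "Wrapped"
  else if ["derivatives", "prediction-markets"].any (fun t => tags_lower.contains t) then "Derivatives"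
  else if ["energy", "carbon-credit"].any (fun t => tags_lower.contains t) then "Energy"
  else if ["real-estate", "commodities"].any (fun t => tags_lower.contains t) then "RealWorld"
  else
    let major_coins := ["BTC", "ETH", "BNB", "XRP", "ADA", "SOL", "DOT", "AVAX", "MATIC", "LINK", "LTC", "BCH", "ETC", "XLM", "VET", "TRX", "FIL", "EOS", "THETA", "AAVE"]
    if major_coins.contains symbol_upper then "Major" else "Other"

-- ===== PORT B =====
-- B's priority table, in A's elif order (cat, keywords)
def pvGroups : List (String × List String) :=
  [("DeFi", ["defi", "decentralized-exchange", "yield-farming", "lending-borrowing"]),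
   ("Meme", ["memes", "meme", "dog-themed"]),
   ("Gaming", ["gaming", "play-to-earn", "nft", "metaverse", "virtual-reality"]),
   ("AI", ["ai-big-data", "artificial-intelligence", "machine-learning"]),
   ("Layer1", ["layer-1", "smart-contracts", "platform"]),
   ("Layer2", ["layer-2", "scaling", "ethereum-ecosystem"]),
   ("Privacy", ["privacy", "privacy-coins"]),
   ("Stablecoin", ["stablecoin", "stablecoins"]),
   ("Exchange", ["exchange-based-tokens", "centralized-exchange"]),
   ("Storage", ["storage", "distributed-computing", "filesharing"]),
   ("Oracle", ["oracles", "oracle"]),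
   ("Social", ["social-money", "content-creation", "fan-token"]),
   ("Enterprise", ["enterprise-solutions", "supply-chain"]),
   ("Wrapped", ["wrapped-tokens", "tokenized-btc"]),
   ("Derivatives", ["derivatives", "prediction-markets"]),
   ("Energy", ["energy", "carbon-credit"]),
   ("RealWorld", ["real-estate", "commodities"])]

-- inverted index: keyword tag -> (priority rank, category), built once from pvGroups
def pvTagRank : PySem.Dict String (Int × String) :=
  (PySem.List.enumerate pvGroups).foldl
    (fun d p => p.2.2.foldl (fun d kw => d.insert kw (p.1, p.2.1)) d) PySem.Dict.empty

def pvMajorCoins : PySem.Set String := PySem.Set.ofList ["BTC", "ETH", "BNB", "XRP", "ADA", "SOL", "DOT", "AVAX", "MATIC", "LINK", "LTC", "BCH", "ETC", "XLM", "VET", "TRX", "FIL", "EOS", "THETA", "AAVE"]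

-- loop body of B's single pass: keep the lowest-rank hit
def pvStep (best : Option (Int × String)) (tag : String) : Option (Int × String) :=
  match PySem.Dict.get? pvTagRank (PySem.Str.lower tag) with
  | none => best
  | some r =>
    match best with
    | none => some r
    | some b => if r.1 < b.1 then some r else best

def categorize_crypto_alt (_name : String) (symbol : String) (tags : List String) : String :=
  match tags.foldl pvStep none with
  | some b => b.2
  | none => if PySem.Set.contains pvMajorCoins (PySem.Str.upper symbol) then "Major" else "Other"

-- ===== PRECONDITION & SPEC =====
def Spec_categorize_crypto (name : String) (symbol : String) (tags : List String) (out : String) : Prop := out = categorize_crypto_alt name symbol tags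
instance (name : String) (symbol : String) (tags : List String) (out : String) : Decidable (Spec_categorize_crypto name symbol tags out) := by unfold Spec_categorize_crypto; infer_instance

-- ===== CLAIM (what is proved, stated in full; the proofs are below) =====
def Claim_equal_categorize_crypto : Prop := ∀ (name : String) (symbol : String) (tags : List String), Dom_categorize_crypto name symbol tags → Spec_categorize_crypto name symbol tags (categorize_crypto name symbol tags)

-- ===== LEMMAS AND PROOFS =====

-- the inverted index as a literal association list (keys are the 45 pairwise-distinct keywords)
def pvTagRankList : List (String × (Int × String)) :=
  [("defi", ((0 : Int), "DeFi")),
   ("decentralized-exchange", ((0 : Int), "DeFi")),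
   ("yield-farming", ((0 : Int), "DeFi")),
   ("lending-borrowing", ((0 : Int), "DeFi")),
   ("memes", ((1 : Int), "Meme")),
   ("meme", ((1 : Int), "Meme")),
   ("dog-themed", ((1 : Int), "Meme")),
   ("gaming", ((2 : Int), "Gaming")),
   ("play-to-earn", ((2 : Int), "Gaming")),
   ("nft", ((2 : Int), "Gaming")),
   ("metaverse", ((2 : Int), "Gaming")),
   ("virtual-reality", ((2 : Int), "Gaming")),
   ("ai-big-data", ((3 : Int), "AI")),
   ("artificial-intelligence", ((3 : Int), "AI")),
   ("machine-learning", ((3 : Int), "AI")),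
   ("layer-1", ((4 : Int), "Layer1")),
   ("smart-contracts", ((4 : Int), "Layer1")),
   ("platform", ((4 : Int), "Layer1")),
   ("layer-2", ((5 : Int), "Layer2")),
   ("scaling", ((5 : Int), "Layer2")),
   ("ethereum-ecosystem", ((5 : Int), "Layer2")),
   ("privacy", ((6 : Int), "Privacy")),
   ("privacy-coins", ((6 : Int), "Privacy")),
   ("stablecoin", ((7 : Int), "Stablecoin")),
   ("stablecoins", ((7 : Int), "Stablecoin")),
   ("exchange-based-tokens", ((8 : Int), "Exchange")),
   ("centralized-exchange", ((8 : Int), "Exchange")),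
   ("storage", ((9 : Int), "Storage")),
   ("distributed-computing", ((9 : Int), "Storage")),
   ("filesharing", ((9 : Int), "Storage")),
   ("oracles", ((10 : Int), "Oracle")),
   ("oracle", ((10 : Int), "Oracle")),
   ("social-money", ((11 : Int), "Social")),
   ("content-creation", ((11 : Int), "Social")),
   ("fan-token", ((11 : Int), "Social")),
   ("enterprise-solutions", ((12 : Int), "Enterprise")),
   ("supply-chain", ((12 : Int), "Enterprise")),
   ("wrapped-tokens", ((13 : Int), "Wrapped")),
   ("tokenized-btc", ((13 : Int), "Wrapped")),
   ("derivatives", ((14 : Int), "Derivatives")),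
   ("prediction-markets", ((14 : Int), "Derivatives")),
   ("energy", ((15 : Int), "Energy")),
   ("carbon-credit", ((15 : Int), "Energy")),
   ("real-estate", ((16 : Int), "RealWorld")),
   ("commodities", ((16 : Int), "RealWorld"))]

theorem pvTagRank_eq : pvTagRank = PySem.Dict.mk pvTagRankList := by
  unfold pvTagRank pvGroups pvTagRankList
  simp [PySem.List.enumerate, PySem.Dict.insert, PySem.Dict.empty]

-- indexed view of the table, for the proofs
def pvKws (i : Nat) : List String := (pvGroups[i]?.map Prod.snd).getD []
def pvCat (i : Nat) : String := (pvGroups[i]?.map Prod.fst).getD ""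
def pvHit (tl : List String) (i : Nat) : Bool := (pvKws i).any (fun k => tl.contains k)

-- A's elif chain, phrased through the indexed view (definitional)
set_option maxHeartbeats 2000000 in
theorem pvA_chain (name symbol : String) (tags : List String) :
    categorize_crypto name symbol tags =
      if pvHit (tags.map PySem.Str.lower) 0 then pvCat 0
      else if pvHit (tags.map PySem.Str.lower) 1 then pvCat 1
      else if pvHit (tags.map PySem.Str.lower) 2 then pvCat 2
      else if pvHit (tags.map PySem.Str.lower) 3 then pvCat 3
      else if pvHit (tags.map PySem.Str.lower) 4 then pvCat 4
      else if pvHit (tags.map PySem.Str.lower) 5 then pvCat 5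
      else if pvHit (tags.map PySem.Str.lower) 6 then pvCat 6
      else if pvHit (tags.map PySem.Str.lower) 7 then pvCat 7
      else if pvHit (tags.map PySem.Str.lower) 8 then pvCat 8
      else if pvHit (tags.map PySem.Str.lower) 9 then pvCat 9
      else if pvHit (tags.map PySem.Str.lower) 10 then pvCat 10
      else if pvHit (tags.map PySem.Str.lower) 11 then pvCat 11
      else if pvHit (tags.map PySem.Str.lower) 12 then pvCat 12
      else if pvHit (tags.map PySem.Str.lower) 13 then pvCat 13
      else if pvHit (tags.map PySem.Str.lower) 14 then pvCat 14
      else if pvHit (tags.map PySem.Str.lower) 15 then pvCat 15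
      else if pvHit (tags.map PySem.Str.lower) 16 then pvCat 16
      else if PySem.Set.contains pvMajorCoins (PySem.Str.upper symbol) then "Major" else "Other" := by
  rfl

-- a key found in an association-list dict is one of its entries
theorem pvAssoc_mem {t : String} {v : Int × String} :
    ∀ L : List (String × (Int × String)), (PySem.Dict.mk L).get? t = some v → (t, v) ∈ L := by
  intro L
  induction L with
  | nil => intro h; simp [PySem.Dict.get?] at h
  | cons p rest ih =>
    obtain ⟨k, w⟩ := p
    intro h
    rw [PySem.Dict.get?_mk_cons] at h
    by_cases hk : (k == t) = true
    · rw [if_pos hk] at h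
      injection h with h'
      rw [beq_iff_eq] at hk
      subst hk; subst h'
      exact List.mem_cons_self
    · rw [if_neg hk] at h
      exact List.mem_cons_of_mem _ (ih h)

-- a hit in the index names a group: rank and category are the group's, key is one of its keywords
theorem pvGet_some (t : String) (r : Int) (c : String)
    (h : PySem.Dict.get? pvTagRank t = some (r, c)) :
    ∃ i : Nat, i < 17 ∧ r = (i : Int) ∧ c = pvCat i ∧ t ∈ pvKws i := by
  rw [pvTagRank_eq] at h
  have hmem := pvAssoc_mem _ h
  simp only [pvTagRankList, List.mem_cons, Prod.mk.injEq, List.not_mem_nil, or_false] at hmem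
  rcases hmem with (⟨rfl, rfl, rfl⟩|⟨rfl, rfl, rfl⟩|⟨rfl, rfl, rfl⟩|⟨rfl, rfl, rfl⟩|⟨rfl, rfl, rfl⟩|⟨rfl, rfl, rfl⟩|⟨rfl, rfl, rfl⟩|⟨rfl, rfl, rfl⟩|⟨rfl, rfl, rfl⟩|⟨rfl, rfl, rfl⟩|⟨rfl, rfl, rfl⟩|⟨rfl, rfl, rfl⟩|⟨rfl, rfl, rfl⟩|⟨rfl, rfl, rfl⟩|⟨rfl, rfl, rfl⟩|⟨rfl, rfl, rfl⟩|⟨rfl, rfl, rfl⟩|⟨rfl, rfl, rfl⟩|⟨rfl, rfl, rfl⟩|⟨rfl, rfl, rfl⟩|⟨rfl, rfl, rfl⟩|⟨rfl, rfl, rfl⟩|⟨rfl, rfl, rfl⟩|⟨rfl, rfl, rfl⟩|⟨rfl, rfl, rfl⟩|⟨rfl, rfl, rfl⟩|⟨rfl, rfl, rfl⟩|⟨rfl, rfl, rfl⟩|⟨rfl, rfl, rfl⟩|⟨rfl, rfl, rfl⟩|⟨rfl, rfl, rfl⟩|⟨rfl, rfl, rfl⟩|⟨rfl, rfl, rfl⟩|⟨rfl,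 rfl, rfl⟩|⟨rfl, rfl, rfl⟩|⟨rfl, rfl, rfl⟩|⟨rfl, rfl, rfl⟩|⟨rfl, rfl, rfl⟩|⟨rfl, rfl, rfl⟩|⟨rfl, rfl, rfl⟩|⟨rfl, rfl, rfl⟩|⟨rfl, rfl, rfl⟩|⟨rfl, rfl, rfl⟩|⟨rfl, rfl, rfl⟩|⟨rfl, rfl, rfl⟩)
  · exact ⟨0, by omega, by decide, by decide, by decide⟩
  · exact ⟨0, by omega, by decide, by decide, by decide⟩
  · exact ⟨0, by omega, by decide, by decide, by decide⟩
  · exact ⟨0, by omega, by decide, by decide, by decide⟩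
  · exact ⟨1, by omega, by decide, by decide, by decide⟩
  · exact ⟨1, by omega, by decide, by decide, by decide⟩
  · exact ⟨1, by omega, by decide, by decide, by decide⟩
  · exact ⟨2, by omega, by decide, by decide, by decide⟩
  · exact ⟨2, by omega, by decide, by decide, by decide⟩
  · exact ⟨2, by omega, by decide, by decide, by decide⟩
  · exact ⟨2, by omega, by decide, by decide, by decide⟩
  · exact ⟨2, by omega, by decide, by decide, by decide⟩
  · exact ⟨3, by omega, by decide, by decide, by decide⟩
  · exact ⟨3, by omega, by decide, by decide, by decide⟩
  · exact ⟨3, by omega, by decide, by decide, by decide⟩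
  · exact ⟨4, by omega, by decide, by decide, by decide⟩
  · exact ⟨4, by omega, by decide, by decide, by decide⟩
  · exact ⟨4, by omega, by decide, by decide, by decide⟩
  · exact ⟨5, by omega, by decide, by decide, by decide⟩
  · exact ⟨5, by omega, by decide, by decide, by decide⟩
  · exact ⟨5, by omega, by decide, by decide, by decide⟩
  · exact ⟨6, by omega, by decide, by decide, by decide⟩
  · exact ⟨6, by omega, by decide, by decide, by decide⟩
  · exact ⟨7, by omega, by decide, by decide, by decide⟩
  · exact ⟨7, by omega, by decide, by decide, by decide⟩
  · exact ⟨8, by omega, by decide, by decide, by decide⟩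
  · exact ⟨8, by omega, by decide, by decide, by decide⟩
  · exact ⟨9, by omega, by decide, by decide, by decide⟩
  · exact ⟨9, by omega, by decide, by decide, by decide⟩
  · exact ⟨9, by omega, by decide, by decide, by decide⟩
  · exact ⟨10, by omega, by decide, by decide, by decide⟩
  · exact ⟨10, by omega, by decide, by decide, by decide⟩
  · exact ⟨11, by omega, by decide, by decide, by decide⟩
  · exact ⟨11, by omega, by decide, by decide, by decide⟩
  · exact ⟨11, by omega, by decide, by decide, by decide⟩
  · exact ⟨12, by omega, by decide, by decide, by decide⟩
  · exact ⟨12, by omega, by decide, by decide, by decide⟩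
  · exact ⟨13, by omega, by decide, by decide, by decide⟩
  · exact ⟨13, by omega, by decide, by decide, by decide⟩
  · exact ⟨14, by omega, by decide, by decide, by decide⟩
  · exact ⟨14, by omega, by decide, by decide, by decide⟩
  · exact ⟨15, by omega, by decide, by decide, by decide⟩
  · exact ⟨15, by omega, by decide, by decide, by decide⟩
  · exact ⟨16, by omega, by decide, by decide, by decide⟩
  · exact ⟨16, by omega, by decide, by decide, by decide⟩

-- a hit in group i yields a tag of tl that the index sends to rank i
theorem pvHit_witness (i : Nat) (tl : List String) (hi : i < 17) (hh : pvHit tl i = true) :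
    ∃ k, k ∈ tl ∧ PySem.Dict.get? pvTagRank k = some ((i : Int), pvCat i) := by
  unfold pvHit at hh
  interval_cases i
  · rw [show pvKws 0 = ["defi", "decentralized-exchange", "yield-farming", "lending-borrowing"] from rfl] at hh
    obtain ⟨k, hkmem, hk⟩ := List.any_eq_true.mp hh
    fin_cases hkmem <;> exact ⟨_, by simpa using hk, by rw [pvTagRank_eq]; decide⟩
  · rw [show pvKws 1 = ["memes", "meme", "dog-themed"] from rfl] at hh
    obtain ⟨k, hkmem, hk⟩ := List.any_eq_true.mp hh
    fin_cases hkmem <;> exact ⟨_, by simpa using hk, by rw [pvTagRank_eq]; decide⟩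
  · rw [show pvKws 2 = ["gaming", "play-to-earn", "nft", "metaverse", "virtual-reality"] from rfl] at hh
    obtain ⟨k, hkmem, hk⟩ := List.any_eq_true.mp hh
    fin_cases hkmem <;> exact ⟨_, by simpa using hk, by rw [pvTagRank_eq]; decide⟩
  · rw [show pvKws 3 = ["ai-big-data", "artificial-intelligence", "machine-learning"] from rfl] at hh
    obtain ⟨k, hkmem, hk⟩ := List.any_eq_true.mp hh
    fin_cases hkmem <;> exact ⟨_, by simpa using hk, by rw [pvTagRank_eq]; decide⟩
  · rw [show pvKws 4 = ["layer-1", "smart-contracts", "platform"] from rfl] at hh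
    obtain ⟨k, hkmem, hk⟩ := List.any_eq_true.mp hh
    fin_cases hkmem <;> exact ⟨_, by simpa using hk, by rw [pvTagRank_eq]; decide⟩
  · rw [show pvKws 5 = ["layer-2", "scaling", "ethereum-ecosystem"] from rfl] at hh
    obtain ⟨k, hkmem, hk⟩ := List.any_eq_true.mp hh
    fin_cases hkmem <;> exact ⟨_, by simpa using hk, by rw [pvTagRank_eq]; decide⟩
  · rw [show pvKws 6 = ["privacy", "privacy-coins"] from rfl] at hh
    obtain ⟨k, hkmem, hk⟩ := List.any_eq_true.mp hh
    fin_cases hkmem <;> exact ⟨_, by simpa using hk, by rw [pvTagRank_eq]; decide⟩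
  · rw [show pvKws 7 = ["stablecoin", "stablecoins"] from rfl] at hh
    obtain ⟨k, hkmem, hk⟩ := List.any_eq_true.mp hh
    fin_cases hkmem <;> exact ⟨_, by simpa using hk, by rw [pvTagRank_eq]; decide⟩
  · rw [show pvKws 8 = ["exchange-based-tokens", "centralized-exchange"] from rfl] at hh
    obtain ⟨k, hkmem, hk⟩ := List.any_eq_true.mp hh
    fin_cases hkmem <;> exact ⟨_, by simpa using hk, by rw [pvTagRank_eq]; decide⟩
  · rw [show pvKws 9 = ["storage", "distributed-computing", "filesharing"] from rfl] at hh
    obtain ⟨k, hkmem, hk⟩ := List.any_eq_true.mp hh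
    fin_cases hkmem <;> exact ⟨_, by simpa using hk, by rw [pvTagRank_eq]; decide⟩
  · rw [show pvKws 10 = ["oracles", "oracle"] from rfl] at hh
    obtain ⟨k, hkmem, hk⟩ := List.any_eq_true.mp hh
    fin_cases hkmem <;> exact ⟨_, by simpa using hk, by rw [pvTagRank_eq]; decide⟩
  · rw [show pvKws 11 = ["social-money", "content-creation", "fan-token"] from rfl] at hh
    obtain ⟨k, hkmem, hk⟩ := List.any_eq_true.mp hh
    fin_cases hkmem <;> exact ⟨_, by simpa using hk, by rw [pvTagRank_eq]; decide⟩
  · rw [show pvKws 12 = ["enterprise-solutions", "supply-chain"] from rfl] at hh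
    obtain ⟨k, hkmem, hk⟩ := List.any_eq_true.mp hh
    fin_cases hkmem <;> exact ⟨_, by simpa using hk, by rw [pvTagRank_eq]; decide⟩
  · rw [show pvKws 13 = ["wrapped-tokens", "tokenized-btc"] from rfl] at hh
    obtain ⟨k, hkmem, hk⟩ := List.any_eq_true.mp hh
    fin_cases hkmem <;> exact ⟨_, by simpa using hk, by rw [pvTagRank_eq]; decide⟩
  · rw [show pvKws 14 = ["derivatives", "prediction-markets"] from rfl] at hh
    obtain ⟨k, hkmem, hk⟩ := List.any_eq_true.mp hh
    fin_cases hkmem <;> exact ⟨_, by simpa using hk, by rw [pvTagRank_eq]; decide⟩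
  · rw [show pvKws 15 = ["energy", "carbon-credit"] from rfl] at hh
    obtain ⟨k, hkmem, hk⟩ := List.any_eq_true.mp hh
    fin_cases hkmem <;> exact ⟨_, by simpa using hk, by rw [pvTagRank_eq]; decide⟩
  · rw [show pvKws 16 = ["real-estate", "commodities"] from rfl] at hh
    obtain ⟨k, hkmem, hk⟩ := List.any_eq_true.mp hh
    fin_cases hkmem <;> exact ⟨_, by simpa using hk, by rw [pvTagRank_eq]; decide⟩

-- evaluating one step of B's loop
theorem pvStep_miss (acc : Option (Int × String)) (t : String)
    (hf : PySem.Dict.get? pvTagRank (PySem.Str.lower t) = none) : pvStep acc t = acc := by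
  unfold pvStep; rw [hf]

theorem pvStep_hit_none (t : String) (v : Int × String)
    (hf : PySem.Dict.get? pvTagRank (PySem.Str.lower t) = some v) : pvStep none t = some v := by
  unfold pvStep; rw [hf]

theorem pvStep_hit_some (t : String) (v b : Int × String)
    (hf : PySem.Dict.get? pvTagRank (PySem.Str.lower t) = some v) :
    pvStep (some b) t = if v.1 < b.1 then some v else some b := by
  unfold pvStep; rw [hf]

-- B's fold returned none: every tag misses the index
theorem pvFold_none (l : List String) :
    ∀ acc : Option (Int × String), l.foldl pvStep acc = none →
      acc = none ∧ ∀ tag ∈ l, PySem.Dict.get? pvTagRank (PySem.Str.lower tag) = none := by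
  induction l with
  | nil => intro acc h; simp only [List.foldl_nil] at h; exact ⟨h, by simp⟩
  | cons t ts ih =>
    intro acc h
    simp only [List.foldl_cons] at h
    obtain ⟨hstep, hall⟩ := ih _ h
    cases hf : PySem.Dict.get? pvTagRank (PySem.Str.lower t) with
    | none =>
      rw [pvStep_miss acc t hf] at hstep
      refine ⟨hstep, ?_⟩
      intro tag htag
      rcases List.mem_cons.mp htag with rfl | hmem
      · exact hf
      · exact hall tag hmem
    | some v =>
      cases acc with
      | none => rw [pvStep_hit_none t v hf] at hstep; cases hstep
      | some b => rw [pvStep_hit_some t v b hf] at hstep; split at hstep <;> cases hstep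

-- B's fold returned some (r, c): (r, c) comes from acc or a tag, and r is minimal
theorem pvFold_some (l : List String) :
    ∀ (acc : Option (Int × String)) (r : Int) (c : String), l.foldl pvStep acc = some (r, c) →
      ((acc = some (r, c) ∨ ∃ tag ∈ l, PySem.Dict.get? pvTagRank (PySem.Str.lower tag) = some (r, c)) ∧
       (∀ tag ∈ l, ∀ j d, PySem.Dict.get? pvTagRank (PySem.Str.lower tag) = some (j, d) → r ≤ j) ∧
       (∀ j d, acc = some (j, d) → r ≤ j)) := by
  induction l with
  | nil =>
    intro acc r c h
    simp only [List.foldl_nil] at h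
    refine ⟨Or.inl h, by simp, ?_⟩
    intro j d hj
    rw [h] at hj
    injection hj with hj'
    injection hj' with h1 h2
    omega
  | cons t ts ih =>
    intro acc r c h
    simp only [List.foldl_cons] at h
    obtain ⟨hw, hmin, haccb⟩ := ih _ r c h
    cases hf : PySem.Dict.get? pvTagRank (PySem.Str.lower t) with
    | none =>
      rw [pvStep_miss acc t hf] at hw haccb
      refine ⟨?_, ?_, haccb⟩
      · rcases hw with hacc | ⟨tag, htag, htg⟩
        · exact Or.inl hacc
        · exact Or.inr ⟨tag, List.mem_cons_of_mem _ htag, htg⟩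
      · intro tag htag j d hjd
        rcases List.mem_cons.mp htag with rfl | hmem
        · rw [hf] at hjd; cases hjd
        · exact hmin tag hmem j d hjd
    | some v =>
      cases acc with
      | none =>
        rw [pvStep_hit_none t v hf] at hw haccb
        have hrv : r ≤ v.1 := haccb v.1 v.2 rfl
        refine ⟨?_, ?_, ?_⟩
        · rcases hw with hacc | ⟨tag, htag, htg⟩
          · injection hacc with e; exact Or.inr ⟨t, List.mem_cons_self, by rw [hf, e]⟩
          · exact Or.inr ⟨tag, List.mem_cons_of_mem _ htag, htg⟩
        · intro tag htag j d hjd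
          rcases List.mem_cons.mp htag with rfl | hmem
          · rw [hf] at hjd
            injection hjd with e
            have hvj : v.1 = j := by rw [e]
            omega
          · exact hmin tag hmem j d hjd
        · intro j d hacc; cases hacc
      | some b =>
        rw [pvStep_hit_some t v b hf] at hw haccb
        by_cases hlt : v.1 < b.1
        · rw [if_pos hlt] at hw haccb
          have hrv : r ≤ v.1 := haccb v.1 v.2 rfl
          refine ⟨?_, ?_, ?_⟩
          · rcases hw with hacc | ⟨tag, htag, htg⟩
            · injection hacc with e; exact Or.inr ⟨t, List.mem_cons_self, by rw [hf, e]⟩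
            · exact Or.inr ⟨tag, List.mem_cons_of_mem _ htag, htg⟩
          · intro tag htag j d hjd
            rcases List.mem_cons.mp htag with rfl | hmem
            · rw [hf] at hjd
              injection hjd with e
              have hvj : v.1 = j := by rw [e]
              omega
            · exact hmin tag hmem j d hjd
          · intro j d hacc
            injection hacc with e
            have hbj : b.1 = j := by rw [e]
            omega
        · rw [if_neg hlt] at hw haccb
          have hrb : r ≤ b.1 := haccb b.1 b.2 rfl
          refine ⟨?_, ?_, ?_⟩
          · rcases hw with hacc | ⟨tag, htag, htg⟩
            · exact Or.inl hacc
            · exact Or.inr ⟨tag, List.mem_cons_of_mem _ htag, htg⟩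
          · intro tag htag j d hjd
            rcases List.mem_cons.mp htag with rfl | hmem
            · rw [hf] at hjd
              injection hjd with e
              have hvj : v.1 = j := by rw [e]
              omega
            · exact hmin tag hmem j d hjd
          · intro j d hacc
            injection hacc with e
            have hbj : b.1 = j := by rw [e]
            omega



-- ===== VERDICT (by name: the statement is the Claim_ definition above) =====
theorem categorize_crypto_spec : Claim_equal_categorize_crypto := by
  intro name symbol tags _
  unfold Spec_categorize_crypto
  cases hfold : tags.foldl pvStep none with
  | none =>
    have hB : categorize_crypto_alt name symbol tags
        = if PySem.Set.contains pvMajorCoins (PySem.Str.upper symbol) then "Major" else "Other" := by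
      unfold categorize_crypto_alt; rw [hfold]
    obtain ⟨-, hall⟩ := pvFold_none tags none hfold
    have hh : ∀ i, i < 17 → pvHit (tags.map PySem.Str.lower) i = false := by
      intro i hi
      by_contra hcon
      rw [Bool.not_eq_false] at hcon
      obtain ⟨k, hk, hg⟩ := pvHit_witness i _ hi hcon
      obtain ⟨tag, htag, rfl⟩ := List.mem_map.mp hk
      rw [hall tag htag] at hg
      cases hg
    rw [pvA_chain, hB]
    simp only [hh 0 (by omega), hh 1 (by omega), hh 2 (by omega), hh 3 (by omega), hh 4 (by omega), hh 5 (by omega), hh 6 (by omega), hh 7 (by omega), hh 8 (by omega), hh 9 (by omega), hh 10 (by omega), hh 11 (by omega), hh 12 (by omega), hh 13 (by omega), hh 14 (by omega), hh 15 (by omega), hh 16 (by omega)]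
    simp
  | some rc =>
    obtain ⟨r, c⟩ := rc
    have hB : categorize_crypto_alt name symbol tags = c := by
      unfold categorize_crypto_alt; rw [hfold]
    obtain ⟨hw, hmin, -⟩ := pvFold_some tags none r c hfold
    rcases hw with hacc | ⟨tag, htag, hg⟩
    · cases hacc
    obtain ⟨i, hi17, hr, hc, hmem⟩ := pvGet_some _ _ _ hg
    subst hr; subst hc
    have htrue : pvHit (tags.map PySem.Str.lower) i = true := by
      unfold pvHit
      refine List.any_eq_true.mpr ⟨PySem.Str.lower tag, hmem, ?_⟩
      simp only [List.contains_eq_mem, decide_eq_true_eq]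
      exact List.mem_map_of_mem htag
    have hfalse : ∀ j, j < i → pvHit (tags.map PySem.Str.lower) j = false := by
      intro j hj
      by_contra hcon
      rw [Bool.not_eq_false] at hcon
      obtain ⟨k, hk, hgj⟩ := pvHit_witness j _ (by omega) hcon
      obtain ⟨tag', htag', rfl⟩ := List.mem_map.mp hk
      have := hmin tag' htag' (j : Int) (pvCat j) hgj
      omega
    rw [pvA_chain, hB]
    interval_cases i
    · simp only [htrue]
      simp
    · simp only [hfalse 0 (by omega), htrue]
      simp
    · simp only [hfalse 0 (by omega), hfalse 1 (by omega), htrue]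
      simp
    · simp only [hfalse 0 (by omega), hfalse 1 (by omega), hfalse 2 (by omega), htrue]
      simp
    · simp only [hfalse 0 (by omega), hfalse 1 (by omega), hfalse 2 (by omega), hfalse 3 (by omega), htrue]
      simp
    · simp only [hfalse 0 (by omega), hfalse 1 (by omega), hfalse 2 (by omega), hfalse 3 (by omega), hfalse 4 (by omega), htrue]
      simp
    · simp only [hfalse 0 (by omega), hfalse 1 (by omega), hfalse 2 (by omega), hfalse 3 (by omega), hfalse 4 (by omega), hfalse 5 (by omega), htrue]
      simp
    · simp only [hfalse 0 (by omega), hfalse 1 (by omega), hfalse 2 (by omega), hfalse 3 (by omega), hfalse 4 (by omega), hfalse 5 (by omega), hfalse 6 (by omega), htrue]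
      simp
    · simp only [hfalse 0 (by omega), hfalse 1 (by omega), hfalse 2 (by omega), hfalse 3 (by omega), hfalse 4 (by omega), hfalse 5 (by omega), hfalse 6 (by omega), hfalse 7 (by omega), htrue]
      simp
    · simp only [hfalse 0 (by omega), hfalse 1 (by omega), hfalse 2 (by omega), hfalse 3 (by omega), hfalse 4 (by omega), hfalse 5 (by omega), hfalse 6 (by omega), hfalse 7 (by omega), hfalse 8 (by omega), htrue]
      simp
    · simp only [hfalse 0 (by omega), hfalse 1 (by omega), hfalse 2 (by omega), hfalse 3 (by omega), hfalse 4 (by omega), hfalse 5 (by omega), hfalse 6 (by omega), hfalse 7 (by omega), hfalse 8 (by omega), hfalse 9 (by omega), htrue]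
      simp
    · simp only [hfalse 0 (by omega), hfalse 1 (by omega), hfalse 2 (by omega), hfalse 3 (by omega), hfalse 4 (by omega), hfalse 5 (by omega), hfalse 6 (by omega), hfalse 7 (by omega), hfalse 8 (by omega), hfalse 9 (by omega), hfalse 10 (by omega), htrue]
      simp
    · simp only [hfalse 0 (by omega), hfalse 1 (by omega), hfalse 2 (by omega), hfalse 3 (by omega), hfalse 4 (by omega), hfalse 5 (by omega), hfalse 6 (by omega), hfalse 7 (by omega), hfalse 8 (by omega), hfalse 9 (by omega), hfalse 10 (by omega), hfalse 11 (by omega), htrue]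
      simp
    · simp only [hfalse 0 (by omega), hfalse 1 (by omega), hfalse 2 (by omega), hfalse 3 (by omega), hfalse 4 (by omega), hfalse 5 (by omega), hfalse 6 (by omega), hfalse 7 (by omega), hfalse 8 (by omega), hfalse 9 (by omega), hfalse 10 (by omega), hfalse 11 (by omega), hfalse 12 (by omega), htrue]
      simp
    · simp only [hfalse 0 (by omega), hfalse 1 (by omega), hfalse 2 (by omega), hfalse 3 (by omega), hfalse 4 (by omega), hfalse 5 (by omega), hfalse 6 (by omega), hfalse 7 (by omega), hfalse 8 (by omega), hfalse 9 (by omega), hfalse 10 (by omega), hfalse 11 (by omega), hfalse 12 (by omega), hfalse 13 (by omega), htrue]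
      simp
    · simp only [hfalse 0 (by omega), hfalse 1 (by omega), hfalse 2 (by omega), hfalse 3 (by omega), hfalse 4 (by omega), hfalse 5 (by omega), hfalse 6 (by omega), hfalse 7 (by omega), hfalse 8 (by omega), hfalse 9 (by omega), hfalse 10 (by omega), hfalse 11 (by omega), hfalse 12 (by omega), hfalse 13 (by omega), hfalse 14 (by omega), htrue]
      simp
    · simp only [hfalse 0 (by omega), hfalse 1 (by omega), hfalse 2 (by omega), hfalse 3 (by omega), hfalse 4 (by omega), hfalse 5 (by omega), hfalse 6 (by omega), hfalse 7 (by omega), hfalse 8 (by omega), hfalse 9 (by omega), hfalse 10 (by omega), hfalse 11 (by omega), hfalse 12 (by omega), hfalse 13 (by omega), hfalse 14 (by omega), hfalse 15 (by omega), htrue]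
      simp
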